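-- pv_equiv track=rewrite | github.com/adammsafi/ta_lab2 | tests/test_bar_contract.py | _normalize_db_url
-- ===== SOURCE A (Python) =====
-- def _normalize_db_url(url: str) -> str:
--     if not url:
--         return url
--     prefixes = (
--         "postgresql+psycopg2://",
--         "postgresql+psycopg://",
--         "postgresql+psycopg3://",
--         "postgres+psycopg2://",
--         "postgres+psycopg://",
--         "postgres+psycopg3://",
--     )
--     for p in prefixes:
--         if url.startswith(p):
--             return "postgresql://" + url[len(p) :]
--     return url
-- ===== SOURCE B (Python) =====
-- def _normalize_db_url(url: str) -> str:
--     # Parse the driver scheme grammatically instead of matching a table of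
--     # full prefixes: "postgres" ["ql"] "+psycopg" ["2" | "3"] "://".
--     i = 0
--     if not url.startswith("postgres", i):
--         return url
--     i += 8
--     if url.startswith("ql", i):
--         i += 2
--     if not url.startswith("+psycopg", i):
--         return url
--     i += 8
--     if i < len(url) and url[i] in "23":
--         i += 1
--     if not url.startswith("://", i):
--         return url
--     return "postgresql://" + url[i + 3:]
-- ===== Notes on version B (the rewrite author's own statement) =====
-- stated objective: alternative
-- what changed: B drops A's table of six full driver prefixes tried with startswith and instead parses the scheme grammatically with an advancing cursor (base scheme, optional ql suffix, driver part, optional version digit, separator), rewriting the scheme to plain postgresql on a full parse.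
import Mathlib
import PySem

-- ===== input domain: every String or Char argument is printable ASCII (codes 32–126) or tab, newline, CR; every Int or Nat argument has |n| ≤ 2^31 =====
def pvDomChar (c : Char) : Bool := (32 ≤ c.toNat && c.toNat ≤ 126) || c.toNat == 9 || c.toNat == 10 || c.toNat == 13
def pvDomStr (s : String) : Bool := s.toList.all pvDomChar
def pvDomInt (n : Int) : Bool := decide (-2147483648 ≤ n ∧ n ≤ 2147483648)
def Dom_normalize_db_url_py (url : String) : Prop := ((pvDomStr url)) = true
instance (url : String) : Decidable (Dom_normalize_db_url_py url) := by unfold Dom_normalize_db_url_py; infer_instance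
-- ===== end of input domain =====

-- B parses the driver scheme grammatically ("postgres" ["ql"] "+psycopg" ["2"|"3"] "://")
-- instead of A's table of six full prefixes tried with startswith; same result, same cost.

-- ===== PORT A =====
def pvPrefixesA : List String :=
  ["postgresql+psycopg2://", "postgresql+psycopg://", "postgresql+psycopg3://",
   "postgres+psycopg2://", "postgres+psycopg://", "postgres+psycopg3://"]

-- the 'for p in prefixes' loop of A
def pvLoopA (url : String) : List String → String
  | [] => url
  | p :: ps =>
    if PySem.Str.startswith url p = true then
      "postgresql://" ++ PySem.Str.slice url (some (PySem.Str.len p)) none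
    else pvLoopA url ps

def normalize_db_url_py (url : String) : String :=
  if url = "" then url else pvLoopA url pvPrefixesA

-- ===== PORT B =====
-- Source B advances a cursor i with url.startswith(pat, i); on the list side the suffix
-- url[i:] is the state, so each 'startswith(pat, i) / i += len(pat)' step is one call
-- of pvEat pat (suffix): some suffix' on a match, none otherwise (exact).
def pvEat : List Char → List Char → Option (List Char)
  | [], s => some s
  | _ :: _, [] => none
  | p :: ps, c :: cs => if c = p then pvEat ps cs else none

def normalize_db_url_py_alt (url : String) : String :=
  match pvEat ['p','o','s','t','g','r','e','s'] url.toList with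
  | none => url
  | some s1 =>
    -- 'if url.startswith("ql", i): i += 2'
    let s2 := (pvEat ['q','l'] s1).getD s1
    match pvEat ['+','p','s','y','c','o','p','g'] s2 with
    | none => url
    | some s3 =>
      -- 'if i < len(url) and url[i] in "23": i += 1'
      let s4 := match s3 with
        | c :: cs => if c = '2' ∨ c = '3' then cs else s3
        | [] => s3
      match pvEat [':','/','/'] s4 with
      | none => url
      | some rest => "postgresql://" ++ String.ofList rest

-- ===== PRECONDITION & SPEC =====
def Spec_normalize_db_url_py (url : String) (out : String) : Prop := out = normalize_db_url_py_alt url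
instance (url : String) (out : String) : Decidable (Spec_normalize_db_url_py url out) := by unfold Spec_normalize_db_url_py; infer_instance

-- ===== CLAIM (what is proved, stated in full; the proofs are below) =====
def Claim_equal_normalize_db_url_py : Prop := ∀ (url : String), Dom_normalize_db_url_py url → Spec_normalize_db_url_py url (normalize_db_url_py url)

-- ===== LEMMAS AND PROOFS =====

lemma pvEat_some_iff (pat s r : List Char) : pvEat pat s = some r ↔ s = pat ++ r := by
  induction pat generalizing s with
  | nil => simp [pvEat]
  | cons p ps ih =>
    cases s with
    | nil => simp [pvEat]
    | cons c cs =>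
      by_cases hc : c = p
      · subst hc; simp [pvEat, ih]
      · simp [pvEat, hc]

-- A's branch value rewritten through the decomposition; len(p) slices off exactly p
lemma pvBranchA (p url : String) (t : List Char) (h : url.toList = p.toList ++ t) :
    "postgresql://" ++ PySem.Str.slice url (some (PySem.Str.len p)) none
      = "postgresql://" ++ String.ofList t := by
  refine String.toList_inj.mp ?_
  simp only [String.toList_append, PySem.Str.toList_slice, PySem.Chars.slice_eq_listSlice,
    PySem.Str.len_eq, PySem.List.slice_from_natCast, String.toList_ofList, h, List.drop_left]

-- a startswith fact from a decomposition of url.toList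
lemma pvStarts (url p : String) (r : List Char) (hu : url.toList = p.toList ++ r) :
    PySem.Str.startswith url p = true := by
  rw [PySem.Str.startswith_eq, PySem.Chars.startswith_iff, hu]
  exact ⟨r, rfl⟩

-- ===== VERDICT (by name: the statement is the Claim_ definition above) =====
theorem normalize_db_url_py_spec : Claim_equal_normalize_db_url_py := by
  intro url _
  unfold Spec_normalize_db_url_py normalize_db_url_py
  by_cases h0 : url = ""
  · subst h0
    simp [normalize_db_url_py_alt, pvEat]
  · rw [if_neg h0]
    simp only [pvPrefixesA, pvLoopA]
    split_ifs with h1 h2 h3 h4 h5 h6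
    · obtain ⟨t, ht⟩ := (PySem.Chars.startswith_iff _ _).mp
        ((PySem.Str.startswith_eq url _) ▸ h1)
      have hu : url.toList =
          'p'::'o'::'s'::'t'::'g'::'r'::'e'::'s'::'q'::'l'::'+'::'p'::'s'::'y'::'c'::'o'::'p'::'g'::'2'::':'::'/'::'/'::t := by
        rw [← ht]; rfl
      rw [pvBranchA _ url t (by rw [hu]; rfl)]
      simp [normalize_db_url_py_alt, hu, pvEat]
    · obtain ⟨t, ht⟩ := (PySem.Chars.startswith_iff _ _).mp
        ((PySem.Str.startswith_eq url _) ▸ h2)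
      have hu : url.toList =
          'p'::'o'::'s'::'t'::'g'::'r'::'e'::'s'::'q'::'l'::'+'::'p'::'s'::'y'::'c'::'o'::'p'::'g'::':'::'/'::'/'::t := by
        rw [← ht]; rfl
      rw [pvBranchA _ url t (by rw [hu]; rfl)]
      simp [normalize_db_url_py_alt, hu, pvEat]
    · obtain ⟨t, ht⟩ := (PySem.Chars.startswith_iff _ _).mp
        ((PySem.Str.startswith_eq url _) ▸ h3)
      have hu : url.toList =
          'p'::'o'::'s'::'t'::'g'::'r'::'e'::'s'::'q'::'l'::'+'::'p'::'s'::'y'::'c'::'o'::'p'::'g'::'3'::':'::'/'::'/'::t := by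
        rw [← ht]; rfl
      rw [pvBranchA _ url t (by rw [hu]; rfl)]
      simp [normalize_db_url_py_alt, hu, pvEat]
    · obtain ⟨t, ht⟩ := (PySem.Chars.startswith_iff _ _).mp
        ((PySem.Str.startswith_eq url _) ▸ h4)
      have hu : url.toList =
          'p'::'o'::'s'::'t'::'g'::'r'::'e'::'s'::'+'::'p'::'s'::'y'::'c'::'o'::'p'::'g'::'2'::':'::'/'::'/'::t := by
        rw [← ht]; rfl
      rw [pvBranchA _ url t (by rw [hu]; rfl)]
      simp [normalize_db_url_py_alt, hu, pvEat]
    · obtain ⟨t, ht⟩ := (PySem.Chars.startswith_iff _ _).mp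
        ((PySem.Str.startswith_eq url _) ▸ h5)
      have hu : url.toList =
          'p'::'o'::'s'::'t'::'g'::'r'::'e'::'s'::'+'::'p'::'s'::'y'::'c'::'o'::'p'::'g'::':'::'/'::'/'::t := by
        rw [← ht]; rfl
      rw [pvBranchA _ url t (by rw [hu]; rfl)]
      simp [normalize_db_url_py_alt, hu, pvEat]
    · obtain ⟨t, ht⟩ := (PySem.Chars.startswith_iff _ _).mp
        ((PySem.Str.startswith_eq url _) ▸ h6)
      have hu : url.toList =
          'p'::'o'::'s'::'t'::'g'::'r'::'e'::'s'::'+'::'p'::'s'::'y'::'c'::'o'::'p'::'g'::'3'::':'::'/'::'/'::t := by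
        rw [← ht]; rfl
      rw [pvBranchA _ url t (by rw [hu]; rfl)]
      simp [normalize_db_url_py_alt, hu, pvEat]
    · -- no prefix matched: B's parser cannot reach its final return either
      unfold normalize_db_url_py_alt
      rcases e1 : pvEat ['p','o','s','t','g','r','e','s'] url.toList with _ | s1
      · rfl
      rcases eql : pvEat ['q','l'] s1 with _ | sq
      all_goals simp only [eql, Option.getD_some, Option.getD_none]
      · -- no "ql": scheme begins "postgres" directly
        rcases e2 : pvEat ['+','p','s','y','c','o','p','g'] s1 with _ | s3
        · rfl
        have hu1 : url.toList = ['p','o','s','t','g','r','e','s'] ++ s1 := (pvEat_some_iff _ _ _).mp e1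
        have hu2 : s1 = ['+','p','s','y','c','o','p','g'] ++ s3 := (pvEat_some_iff _ _ _).mp e2
        rcases s3 with _ | ⟨c, cs⟩
        · simp [pvEat]
        by_cases hd : c = '2' ∨ c = '3'
        · simp only [if_pos hd]
          rcases e3 : pvEat [':','/','/'] cs with _ | rest
          · rfl
          exfalso
          have hu3 : cs = [':','/','/'] ++ rest := (pvEat_some_iff _ _ _).mp e3
          rcases hd with hd | hd
          · exact h4 (pvStarts url "postgres+psycopg2://" rest
              (by rw [hu1, hu2, hd, hu3]; rfl))
          · exact h6 (pvStarts url "postgres+psycopg3://" rest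
              (by rw [hu1, hu2, hd, hu3]; rfl))
        · simp only [if_neg hd]
          rcases e3 : pvEat [':','/','/'] (c :: cs) with _ | rest
          · rfl
          exfalso
          have hu3 : c :: cs = [':','/','/'] ++ rest := (pvEat_some_iff _ _ _).mp e3
          exact h5 (pvStarts url "postgres+psycopg://" rest
            (by rw [hu1, hu2, hu3]; rfl))
      · -- "ql" consumed: scheme begins "postgresql"
        rcases e2 : pvEat ['+','p','s','y','c','o','p','g'] sq with _ | s3
        · rfl
        have hu1 : url.toList = ['p','o','s','t','g','r','e','s'] ++ s1 := (pvEat_some_iff _ _ _).mp e1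
        have huq : s1 = ['q','l'] ++ sq := (pvEat_some_iff _ _ _).mp eql
        have hu2 : sq = ['+','p','s','y','c','o','p','g'] ++ s3 := (pvEat_some_iff _ _ _).mp e2
        rcases s3 with _ | ⟨c, cs⟩
        · simp [pvEat]
        by_cases hd : c = '2' ∨ c = '3'
        · simp only [if_pos hd]
          rcases e3 : pvEat [':','/','/'] cs with _ | rest
          · rfl
          exfalso
          have hu3 : cs = [':','/','/'] ++ rest := (pvEat_some_iff _ _ _).mp e3
          rcases hd with hd | hd
          · exact h1 (pvStarts url "postgresql+psycopg2://" rest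
              (by rw [hu1, huq, hu2, hd, hu3]; rfl))
          · exact h3 (pvStarts url "postgresql+psycopg3://" rest
              (by rw [hu1, huq, hu2, hd, hu3]; rfl))
        · simp only [if_neg hd]
          rcases e3 : pvEat [':','/','/'] (c :: cs) with _ | rest
          · rfl
          exfalso
          have hu3 : c :: cs = [':','/','/'] ++ rest := (pvEat_some_iff _ _ _).mp e3
          exact h2 (pvStarts url "postgresql+psycopg://" rest
            (by rw [hu1, huq, hu2, hu3]; rfl))
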